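-- pv_equiv track=rewrite | github.com/CodingSinger/algorithm | leetcode/605.py | helper
-- ===== SOURCE A (Python) =====
-- def helper(flowerbed,n):
--     flowerbed += [0,1]
--     flowerbed = [1,0]+flowerbed
--     last = -1
--     sum = 0
--     for i,num in enumerate(flowerbed):
--         if num == 1:
--             current = i
--             empty = current-last-1
--             last = current
--             if empty <=1:
--                 continue
--             sum += (empty-1) //2
--
--     return sum>=n
-- ===== SOURCE B (Python) =====
-- def helper(flowerbed, n):
--     # reproduce A's only observable mutation of the argument
--     flowerbed += [0, 1]
--     # greedy single pass over a locally padded copy; a cell counts as a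
--     # flower exactly when it equals 1 (A's convention)
--     bed = [0] + flowerbed
--     planted = 0
--     i = 1
--     while i + 1 < len(bed):
--         if bed[i] != 1 and bed[i - 1] != 1 and bed[i + 1] != 1:
--             planted += 1
--             i += 2  # skip the neighbour so plantings are never adjacent
--         else:
--             i += 1
--     return planted >= n
-- ===== Notes on version B (the rewrite author's own statement) =====
-- stated objective: alternative
-- what changed: Replaces A's per-gap arithmetic ((empty-1)//2 summed at each flower via an enumerate/last-index scan over a doubly padded list) with a greedy single pass that plants wherever a cell and both neighbours are non-flowers and skips the next cell, returning planted >= n; both keep A's only observable mutation flowerbed += [0,1].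
import Mathlib
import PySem

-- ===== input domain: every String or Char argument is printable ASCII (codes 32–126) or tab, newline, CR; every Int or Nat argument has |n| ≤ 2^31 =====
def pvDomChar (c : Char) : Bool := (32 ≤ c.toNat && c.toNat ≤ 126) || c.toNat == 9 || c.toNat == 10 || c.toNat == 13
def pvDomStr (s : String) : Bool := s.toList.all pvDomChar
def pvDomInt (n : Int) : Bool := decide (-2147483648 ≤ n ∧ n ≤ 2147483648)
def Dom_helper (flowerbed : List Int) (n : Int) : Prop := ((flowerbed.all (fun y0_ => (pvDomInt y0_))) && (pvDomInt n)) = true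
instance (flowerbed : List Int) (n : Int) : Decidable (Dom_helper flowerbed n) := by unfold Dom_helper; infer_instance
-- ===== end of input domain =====

-- B replaces A's per-gap arithmetic with a greedy single pass (plant-and-skip counter);
-- objective: alternative decomposition. Both A and B append [0,1] to the caller's list
-- (A's only observable mutation); the equivalence proved is about the return value.

-- ===== PORT A =====
-- the loop body of A's for-loop, state = (last, sum)
def aStep (s : Int × Int) (p : Int × Int) : Int × Int :=
  if p.2 = 1 then
    let current := p.1
    let empty := current - s.1 - 1
    if empty ≤ 1 then (current, s.2)
    else (current, s.2 + PySem.Int.floordiv (empty - 1) 2)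
  else s

def helper (flowerbed : List Int) (n : Int) : Bool :=
  let fb := [(1 : Int), 0] ++ (flowerbed ++ [0, 1])
  let st := (PySem.List.enumerate fb 0).foldl aStep (-1, 0)
  decide (st.2 ≥ n)

-- ===== PORT B =====
-- B's while-loop: scan index i, plant where cell and both neighbours are ≠ 1, then skip one
def altGo (bed : List Int) (i : Nat) (planted : Int) : Int :=
  if i + 1 < bed.length then
    if bed.getD i 0 ≠ 1 ∧ bed.getD (i - 1) 0 ≠ 1 ∧ bed.getD (i + 1) 0 ≠ 1 then
      altGo bed (i + 2) (planted + 1)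
    else altGo bed (i + 1) planted
  else planted
termination_by bed.length - i

def helper_alt (flowerbed : List Int) (n : Int) : Bool :=
  let bed := [(0 : Int)] ++ (flowerbed ++ [0, 1])
  decide (altGo bed 1 0 ≥ n)

-- ===== PRECONDITION & SPEC =====
def Spec_helper (flowerbed : List Int) (n : Int) (out : Bool) : Prop := out = helper_alt flowerbed n
instance (flowerbed : List Int) (n : Int) (out : Bool) : Decidable (Spec_helper flowerbed n out) := by unfold Spec_helper; infer_instance

-- ===== CLAIM (what is proved, stated in full; the proofs are below) =====
def Claim_equal_helper : Prop := ∀ (flowerbed : List Int) (n : Int), Dom_helper flowerbed n → Spec_helper flowerbed n (helper flowerbed n)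

-- ===== LEMMAS AND PROOFS =====

-- A's pay-off when a gap of `c` empties closes
def pay (c : Int) : Int := if c ≤ 1 then 0 else PySem.Int.floordiv (c - 1) 2

-- A's loop as a recursion over the list, `c` = empties since the last flower
def gA (c : Int) : List Int → Int
  | [] => 0
  | x :: t => if x = 1 then pay c + gA 0 t else gA (c + 1) t

-- B's loop as a recursion over the suffix, `pb` = "previous cell equals 1"
def gB (pb : Bool) : List Int → Int
  | [] => 0
  | [_] => 0
  | x :: r :: rs =>
    if x ≠ 1 ∧ pb = false ∧ r ≠ 1 then 1 + gB false rs
    else gB (x == 1) (r :: rs)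
termination_by l => l.length

theorem pay_succ_succ (c : Int) (hc : 1 ≤ c) : pay (c + 2) = 1 + pay c := by
  unfold pay
  rw [PySem.Int.floordiv_eq_ediv_of_pos (by omega)]
  by_cases h : c ≤ 1
  · rw [if_pos h, if_neg (by omega : ¬ c + 2 ≤ 1)]; omega
  · rw [if_neg (by omega : ¬ c + 2 ≤ 1), if_neg h,
      PySem.Int.floordiv_eq_ediv_of_pos (by omega)]; omega

theorem gA_nil (c : Int) : gA c [] = 0 := rfl
theorem gA_cons (c x : Int) (t : List Int) :
    gA c (x :: t) = if x = 1 then pay c + gA 0 t else gA (c + 1) t := rfl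

theorem gB_nil (pb : Bool) : gB pb [] = 0 := by simp [gB]
theorem gB_one (pb : Bool) (x : Int) : gB pb [x] = 0 := by simp [gB]
theorem gB_cons2 (pb : Bool) (x r : Int) (rs : List Int) :
    gB pb (x :: r :: rs) =
      if x ≠ 1 ∧ pb = false ∧ r ≠ 1 then 1 + gB false rs else gB (x == 1) (r :: rs) := by
  rw [gB]

-- shift lemma: two extra empties in front of a run that is eventually closed by a 1
theorem gA_shift (t : List Int) : ∀ c : Int, 1 ≤ c → gA (c + 2) (t ++ [1]) = 1 + gA c (t ++ [1]) := by
  induction t with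
  | nil =>
    intro c hc
    simp only [List.nil_append, gA_cons, gA_nil, pay_succ_succ c hc]
    simp
  | cons x t ih =>
    intro c hc
    by_cases hx : x = 1
    · simp only [List.cons_append, gA_cons, if_pos hx, pay_succ_succ c hc]; ring
    · simp only [List.cons_append, gA_cons, if_neg hx]
      rw [show c + 2 + 1 = c + 1 + 2 from by ring]
      exact ih (c + 1) (by omega)

theorem gB_short (pb : Bool) (l : List Int) (h : l.length ≤ 1) : gB pb l = 0 := by
  match l with
  | [] => exact gB_nil pb
  | [x] => exact gB_one pb x
  | _ :: _ :: _ => simp at h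

-- the core correspondence: on lists closed by a trailing 1, greedy = gap arithmetic
theorem gB_eq_gA : ∀ (m : Nat) (t : List Int), t.length ≤ m →
    gB true (t ++ [1]) = gA 0 (t ++ [1]) ∧ gB false (t ++ [1]) = gA 1 (t ++ [1]) := by
  intro m
  induction m with
  | zero =>
    intro t ht
    have : t = [] := List.eq_nil_of_length_eq_zero (by omega)
    subst this
    constructor <;> simp [gB_one, gA_cons, gA_nil, pay]
  | succ m ih =>
    intro t ht
    match t with
    | [] => constructor <;> simp [gB_one, gA_cons, gA_nil, pay]
    | [a] =>
      by_cases ha : a = 1 <;> constructor <;>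
        simp [gB_cons2, gB_one, gB_nil, gA_cons, gA_nil, pay, ha,
          PySem.Int.floordiv_eq_ediv_of_pos (by omega : (0:Int) < 2)]
    | a :: b :: t' =>
      have hlen : (b :: t').length ≤ m := by simp at ht ⊢; omega
      have ih1 := ih (b :: t') hlen
      simp only [List.cons_append] at ih1
      by_cases ha : a = 1
      · subst ha
        simp only [List.cons_append, gB_cons2,
          if_neg (by simp : ¬ ((1:Int) ≠ 1 ∧ (true  : Bool) = false ∧ b ≠ 1)),
          if_neg (by simp : ¬ ((1:Int) ≠ 1 ∧ (false : Bool) = false ∧ b ≠ 1)),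
          show ((1:Int) == 1) = true from by simp,
          gA_cons, if_pos rfl, ih1.1]
        constructor <;> · simp [pay]
      · constructor
        · -- pb = true: never plant at the head
          simp only [List.cons_append, gB_cons2,
            if_neg (by simp : ¬ (a ≠ 1 ∧ (true : Bool) = false ∧ b ≠ 1)),
            show (a == 1) = false from by simp [ha],
            gA_cons, if_neg ha, ih1.2]
          norm_num
        · by_cases hb : b = 1
          · -- gap of exactly one empty: neither side plants
            subst hb
            have ih2 := ih (1 :: t') (by simp at ht ⊢; omega)
            simp only [List.cons_append] at ih2
            simp only [List.cons_append, gB_cons2,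
              if_neg (by simp : ¬ (a ≠ 1 ∧ (false : Bool) = false ∧ (1:Int) ≠ 1)),
              show (a == 1) = false from by simp [ha], ih2.2,
              gA_cons, if_neg ha, if_pos rfl]
            simp [pay, PySem.Int.floordiv_eq_ediv_of_pos (by omega : (0:Int) < 2)]
          · -- plant at the head, skip b
            have ih3 := ih t' (by simp at ht ⊢; omega)
            have hsh : gA (1 + 1 + 1) (t' ++ [1]) = 1 + gA 1 (t' ++ [1]) := by
              rw [show (1:Int) + 1 + 1 = 1 + 2 from by ring]
              exact gA_shift t' 1 le_rfl
            simp only [List.cons_append, gB_cons2, ih3.2, gA_cons, if_neg ha, if_neg hb, hsh]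
            simp [ha, hb]

-- A's fold over enumerate equals gA
theorem foldA_eq_gA (t : List Int) : ∀ (s last sum : Int),
    ((PySem.List.enumerate t s).foldl aStep (last, sum)).2 = sum + gA (s - last - 1) t := by
  induction t with
  | nil => intro s last sum; simp [PySem.List.enumerate_nil, gA_nil]
  | cons x t ih =>
    intro s last sum
    rw [PySem.List.enumerate_cons, List.foldl_cons]
    have harg : s + 1 - s - 1 = (0 : Int) := by ring
    by_cases hx : x = 1
    · by_cases he : s - last - 1 ≤ 1
      · simp [aStep, hx, he, ih, gA_cons, pay, harg]
      · simp [aStep, hx, he, ih, gA_cons, pay, harg]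
        try ring
    · have harg2 : s + 1 - last - 1 = s - last - 1 + 1 := by ring
      simp [aStep, hx, ih, gA_cons, harg2]

-- B's while-loop equals gB
theorem altGo_eq_gB (bed : List Int) : ∀ (i : Nat) (planted : Int), 1 ≤ i →
    altGo bed i planted = planted + gB (bed.getD (i - 1) 0 == 1) (bed.drop i) := by
  intro i planted hi
  induction i, planted using altGo.induct bed with
  | case1 i planted hlt hcond ih =>
    rw [altGo, if_pos hlt, if_pos hcond]
    rw [ih (by omega)]
    have hi1 : i < bed.length := by omega
    have hi2 : i + 1 < bed.length := hlt
    rw [List.drop_eq_getElem_cons hi1, List.drop_eq_getElem_cons hi2]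
    have hgi : bed.getD i 0 = bed[i] := List.getD_eq_getElem bed 0 hi1
    have hgi1 : bed.getD (i + 1) 0 = bed[i + 1] := List.getD_eq_getElem bed 0 hi2
    obtain ⟨h1, h2, h3⟩ := hcond
    rw [gB, if_pos ⟨by rwa [hgi] at h1, by simpa [List.getD] using h2, by rwa [hgi1] at h3⟩]
    have : bed.getD (i + 2 - 1) 0 = bed[i + 1] := by
      simpa using List.getD_eq_getElem bed 0 hi2
    rw [this, show (bed[i+1] == 1) = false from by simp [hgi1 ▸ h3]]
    ring
  | case2 i planted hlt hcond ih =>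
    rw [altGo, if_pos hlt, if_neg hcond]
    rw [ih (by omega)]
    have hi1 : i < bed.length := by omega
    have hi2 : i + 1 < bed.length := hlt
    rw [List.drop_eq_getElem_cons hi1, List.drop_eq_getElem_cons hi2]
    rw [gB]
    have hgi : bed.getD i 0 = bed[i] := List.getD_eq_getElem bed 0 hi1
    by_cases hpl : bed[i] ≠ 1 ∧ (bed.getD (i - 1) 0 == 1) = false ∧ bed[i + 1] ≠ 1
    · exact absurd ⟨by rw [hgi]; exact hpl.1, by simpa [List.getD] using hpl.2.1, by
        rw [List.getD_eq_getElem bed 0 hi2]; exact hpl.2.2⟩ hcond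
    · rw [if_neg hpl]
      have : bed.getD (i + 1 - 1) 0 = bed[i] := by simpa using hgi
      rw [this]
  | case3 i planted hge =>
    rw [altGo, if_neg hge]
    rw [gB_short _ _ (by simp [List.length_drop]; omega)]
    ring

-- ===== VERDICT (by name: the statement is the Claim_ definition above) =====
theorem helper_spec : Claim_equal_helper := by
  intro flowerbed n _
  unfold Spec_helper
  show helper flowerbed n = helper_alt flowerbed n
  simp only [helper, helper_alt]
  rw [foldA_eq_gA, altGo_eq_gB _ 1 0 le_rfl]
  have h := (gB_eq_gA (flowerbed ++ [0]).length (flowerbed ++ [0]) le_rfl).2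
  have hb : (flowerbed ++ [0]) ++ [1] = flowerbed ++ [0, 1] := by simp
  rw [hb] at h
  have e0 : (0 : Int) - (-1) - 1 = 0 := by ring
  simp only [List.cons_append, List.nil_append, e0, gA_cons, pay, h]
  norm_num
  rw [show ((0 : Int) == 1) = false from by decide, h]
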